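-- pv_equiv track=rewrite | github.com/Jaskey15/Blue-Thumb-Dashboard | visualizations/map_viz.py | filter_sites_by_active_status
-- ===== SOURCE A (Python) =====
-- def filter_sites_by_active_status(sites, active_only=False):
--     """
--     Filter sites based on active status and return counts.
--
--     Args:
--         sites: List of site dictionaries
--         active_only: Boolean - if True, only return active sites
--
--     Returns:
--         Tuple of (filtered_sites, active_count, historic_count, total_count)
--     """
--     if not sites:
--         return [], 0, 0, 0
--
--     total_count = len(sites)
--     active_sites = [site for site in sites if site.get('active', False)]
--     historic_sites = [site for site in sites if not site.get('active', False)]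
--
--     active_count = len(active_sites)
--     historic_count = len(historic_sites)
--
--     if active_only:
--         return active_sites, active_count, historic_count, total_count
--     else:
--         return sites, active_count, historic_count, total_count
-- ===== SOURCE B (Python) =====
-- def filter_sites_by_active_status(sites, active_only=False):
--     """Single pass: collect active sites and count in one loop; derive historic by subtraction."""
--     if not sites:
--         return [], 0, 0, 0
--     active_sites = []
--     n = 0
--     for site in sites:
--         n += 1
--         if site.get('active', False):
--             active_sites.append(site)
--     a = len(active_sites)
--     return (active_sites if active_only else sites), a, n - a, n
-- ===== Notes on version B (the rewrite author's own statement) =====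
-- stated objective: simpler
-- what changed: Replaces the two list comprehensions (active and historic) with a single loop that collects active sites while counting, deriving historic_count by subtraction; the historic list is never built.
import Mathlib
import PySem

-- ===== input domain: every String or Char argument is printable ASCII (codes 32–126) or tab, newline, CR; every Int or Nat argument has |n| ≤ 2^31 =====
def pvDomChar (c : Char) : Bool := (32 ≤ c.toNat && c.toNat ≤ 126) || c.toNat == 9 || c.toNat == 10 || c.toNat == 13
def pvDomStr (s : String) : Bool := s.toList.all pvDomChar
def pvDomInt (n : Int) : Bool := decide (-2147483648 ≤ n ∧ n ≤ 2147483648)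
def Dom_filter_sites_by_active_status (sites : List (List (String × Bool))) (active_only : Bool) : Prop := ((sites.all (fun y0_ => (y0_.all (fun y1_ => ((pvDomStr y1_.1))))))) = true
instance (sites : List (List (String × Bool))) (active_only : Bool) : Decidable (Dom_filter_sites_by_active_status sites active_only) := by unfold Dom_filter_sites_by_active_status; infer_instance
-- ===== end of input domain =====

-- B: one pass collecting active sites and counting; historic derived by subtraction ("simpler").
-- ===== PORT A =====
-- site.get('active', False): first-match association-list lookup, exact Python dict semantics
def pvGetActive (site : List (String × Bool)) : Bool :=
  (PySem.Dict.mk site).getD "active" false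

def filter_sites_by_active_status (sites : List (List (String × Bool))) (active_only : Bool) : (List (List (String × Bool))) × Int × Int × Int :=
  if sites.isEmpty then ([], 0, 0, 0)
  else
    let total_count : Int := sites.length
    let active_sites := sites.filter (fun site => pvGetActive site)
    let historic_sites := sites.filter (fun site => ! pvGetActive site)
    let active_count : Int := active_sites.length
    let historic_count : Int := historic_sites.length
    if active_only then (active_sites, active_count, historic_count, total_count)
    else (sites, active_count, historic_count, total_count)

-- ===== PORT B =====
def filter_sites_by_active_status_alt (sites : List (List (String × Bool))) (active_only : Bool) : (List (List (String × Bool))) × Int × Int × Int :=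
  if sites.isEmpty then ([], 0, 0, 0)
  else
    let st := sites.foldl (fun (acc : List (List (String × Bool)) × Int) site =>
      let acc := (acc.1, acc.2 + 1)
      if pvGetActive site then (acc.1 ++ [site], acc.2) else acc) ([], 0)
    let a : Int := st.1.length
    ((if active_only then st.1 else sites), a, st.2 - a, st.2)

-- ===== PRECONDITION & SPEC =====
def Spec_filter_sites_by_active_status (sites : List (List (String × Bool))) (active_only : Bool) (out : (List (List (String × Bool))) × Int × Int × Int) : Prop := out = filter_sites_by_active_status_alt sites active_only
instance (sites : List (List (String × Bool))) (active_only : Bool) (out : (List (List (String × Bool))) × Int × Int × Int) : Decidable (Spec_filter_sites_by_active_status sites active_only out) := by unfold Spec_filter_sites_by_active_status; infer_instance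

-- ===== CLAIM (what is proved, stated in full; the proofs are below) =====
def Claim_equal_filter_sites_by_active_status : Prop := ∀ (sites : List (List (String × Bool))) (active_only : Bool), Dom_filter_sites_by_active_status sites active_only → Spec_filter_sites_by_active_status sites active_only (filter_sites_by_active_status sites active_only)

-- ===== LEMMAS AND PROOFS =====

-- ===== VERDICT (by name: the statement is the Claim_ definition above) =====
lemma pv_fold (sites : List (List (String × Bool))) (l0 : List (List (String × Bool))) (n0 : Int) :
    sites.foldl (fun (acc : List (List (String × Bool)) × Int) site =>
      let acc := (acc.1, acc.2 + 1)
      if pvGetActive site then (acc.1 ++ [site], acc.2) else acc) (l0, n0)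
    = (l0 ++ sites.filter (fun site => pvGetActive site), n0 + sites.length) := by
  induction sites generalizing l0 n0 with
  | nil => simp
  | cons x xs ih =>
    simp only [List.foldl_cons, List.filter_cons]
    by_cases h : pvGetActive x = true <;> simp [h, ih] <;> ring

lemma pv_len_split (sites : List (List (String × Bool))) :
    ((sites.filter (fun site => ! pvGetActive site)).length : Int)
    = (sites.length : Int) - (sites.filter (fun site => pvGetActive site)).length := by
  induction sites with
  | nil => simp
  | cons x xs ih =>
    simp only [List.filter_cons]
    by_cases h : pvGetActive x = true <;> simp [h, ih] <;> push_cast <;> ring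

theorem filter_sites_by_active_status_spec : Claim_equal_filter_sites_by_active_status := by
  intro sites active_only _
  unfold Spec_filter_sites_by_active_status filter_sites_by_active_status filter_sites_by_active_status_alt
  by_cases he : sites.isEmpty <;> simp [he, pv_fold, pv_len_split]
  cases active_only <;> simp
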